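-- pv_equiv track=rewrite | github.com/d-e-e-p/doc2quiz | src/doc2quiz/Search.py | reinsert_hyphen_newline
-- ===== SOURCE A (Python) =====
-- def reinsert_hyphen_newline(text, positions, target_string, hyphen_newline=' -\n', replacement=''):
--     """
--     Re-inserts ' -\n' back into the text at the specified positions, adjusted for offset.
--
--     Parameters:
--     text (str): The input text.
--     positions (list): The list of positions where ' -\n' was removed.
--     offset (int): The offset to adjust positions.
--
--     Returns:
--     str: The text with ' -\n' re-inserted.
--     """
--     offset = text.index(target_string)
--     length = len(target_string)
--     snippet = text[offset:offset + length]
--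
--     accumulated_spaces = 0
--     for pos in positions:
--         adjusted_pos = pos - offset - accumulated_spaces
--         if adjusted_pos < 0:
--             accumulated_spaces += len(hyphen_newline) - len(replacement)
--         elif adjusted_pos < len(snippet):
--             snippet = snippet[:adjusted_pos] + hyphen_newline + snippet[adjusted_pos + len(replacement):]
--         else:
--             # adjusted_pos is past the snippet..
--             return snippet
--
--     # in case positions is empty
--     return snippet
-- ===== SOURCE B (Python) =====
-- def reinsert_hyphen_newline(text, positions, target_string, hyphen_newline=' -\n', replacement=''):
--     offset = text.index(target_string)
--     bufs = (target_string, hyphen_newline)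
--     # piece table: (src, start, length) triples into bufs; O(1) splits, join once at the end
--     pieces = [(0, 0, len(target_string))]
--     total = len(target_string)
--     hn_len = len(hyphen_newline)
--     d = len(replacement)
--     delta = hn_len - d
--     accumulated_spaces = 0
--     for pos in positions:
--         p = pos - offset - accumulated_spaces
--         if p < 0:
--             accumulated_spaces += delta
--         elif p < total:
--             pieces = _take_pieces(pieces, p) + [(1, 0, hn_len)] + _drop_pieces(pieces, p + d)
--             total = p + hn_len + max(total - (p + d), 0)
--         else:
--             break
--     return ''.join(bufs[s][a:a + l] for (s, a, l) in pieces)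
--
--
-- def _take_pieces(pieces, n):
--     out = []
--     for (s, a, l) in pieces:
--         if n <= l:
--             out.append((s, a, n))
--             return out
--         out.append((s, a, l))
--         n -= l
--     return out
--
--
-- def _drop_pieces(pieces, n):
--     for i, (s, a, l) in enumerate(pieces):
--         if n < l:
--             return [(s, a + n, l - n)] + pieces[i + 1:]
--         n -= l
--     return []
-- ===== Notes on version B (the rewrite author's own statement) =====
-- stated objective: faster
-- what changed: B replaces A's rebuild-the-whole-snippet string concatenation per inserted marker with a piece table of (source, start, length) triples over the two buffers - each insertion is an O(1) split after a walk over the piece list, and the result string is joined once at the end.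
-- outside the precondition, e.g. on reinsert_hyphen_newline('abc', [0], 'zz', ' -\n', ''): A raises ValueError, B raises ValueError
import Mathlib
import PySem

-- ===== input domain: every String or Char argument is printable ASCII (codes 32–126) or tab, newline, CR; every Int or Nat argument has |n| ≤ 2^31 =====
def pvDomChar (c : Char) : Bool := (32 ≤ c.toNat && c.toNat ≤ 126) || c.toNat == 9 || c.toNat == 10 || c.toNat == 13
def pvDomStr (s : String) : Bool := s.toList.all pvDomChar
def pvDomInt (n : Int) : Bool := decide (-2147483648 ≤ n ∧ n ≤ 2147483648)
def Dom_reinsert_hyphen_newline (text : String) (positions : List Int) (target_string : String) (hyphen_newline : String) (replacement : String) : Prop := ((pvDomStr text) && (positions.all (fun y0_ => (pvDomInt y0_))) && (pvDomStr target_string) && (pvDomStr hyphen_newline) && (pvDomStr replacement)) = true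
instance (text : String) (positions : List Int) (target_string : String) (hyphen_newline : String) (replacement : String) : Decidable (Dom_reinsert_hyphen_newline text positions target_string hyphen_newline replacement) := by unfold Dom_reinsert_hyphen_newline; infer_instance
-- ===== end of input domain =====

-- B replaces A's repeated whole-string slicing/rebuilding with a piece table ((source, start,
-- length) triples over the two buffers): each insertion is an O(1) split after a walk over the
-- piece list, and the string is joined once at the end.

-- ===== PORT A =====
-- A's loop: state (snippet, accumulated_spaces); early return when adjusted_pos is past the snippet.
def pvLoopA (hn repl : List Char) (offset : Int) : List Int → List Char → Int → List Char
  | [], snippet, _ => snippet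
  | pos :: rest, snippet, acc =>
    let adjusted := pos - offset - acc
    if adjusted < 0 then
      pvLoopA hn repl offset rest snippet (acc + ((hn.length : Int) - (repl.length : Int)))
    else if adjusted < (snippet.length : Int) then
      pvLoopA hn repl offset rest
        (PySem.List.slice snippet none (some adjusted) ++ hn ++
          PySem.List.slice snippet (some (adjusted + (repl.length : Int))) none) acc
    else snippet

def reinsert_hyphen_newline (text : String) (positions : List Int) (target_string : String) (hyphen_newline : String) (replacement : String) : String :=
  let t := text.toList
  let tg := target_string.toList
  let offset := PySem.Chars.find t tg        -- text.index(target_string); Pre_ excludes the ValueError (-1) case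
  let length : Int := (tg.length : Int)
  let snippet := PySem.List.slice t (some offset) (some (offset + length))
  String.ofList (pvLoopA hyphen_newline.toList replacement.toList offset positions snippet 0)

-- ===== PORT B =====
-- a piece is (src, start, len): src 0 = the target_string buffer, src 1 = the hyphen_newline buffer
def pvTakePieces (n : Nat) : List (Nat × Nat × Nat) → List (Nat × Nat × Nat)
  | [] => []
  | (s, a, l) :: rest => if n ≤ l then [(s, a, n)] else (s, a, l) :: pvTakePieces (n - l) rest

def pvDropPieces (n : Nat) : List (Nat × Nat × Nat) → List (Nat × Nat × Nat)
  | [] => []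
  | (s, a, l) :: rest => if n < l then (s, a + n, l - n) :: rest else pvDropPieces (n - l) rest

def pvLoopB (hnLen d : Nat) (offset : Int) : List Int → List (Nat × Nat × Nat) → Nat → Int → List (Nat × Nat × Nat)
  | [], pieces, _, _ => pieces
  | pos :: rest, pieces, total, acc =>
    let p := pos - offset - acc
    if p < 0 then
      pvLoopB hnLen d offset rest pieces total (acc + ((hnLen : Int) - (d : Int)))
    else if p < (total : Int) then
      pvLoopB hnLen d offset rest
        (pvTakePieces p.toNat pieces ++ [(1, 0, hnLen)] ++ pvDropPieces (p.toNat + d) pieces)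
        (p.toNat + hnLen + (total - (p.toNat + d))) acc
    else pieces

-- final join: materialize each piece as a slice of its buffer
def pvMatPiece (tg hn : List Char) (pc : Nat × Nat × Nat) : List Char :=
  ((if pc.1 = 0 then tg else hn).drop pc.2.1).take pc.2.2

def pvMat (tg hn : List Char) (ps : List (Nat × Nat × Nat)) : List Char :=
  (ps.map (pvMatPiece tg hn)).flatten

def reinsert_hyphen_newline_alt (text : String) (positions : List Int) (target_string : String) (hyphen_newline : String) (replacement : String) : String :=
  let t := text.toList
  let tg := target_string.toList
  let hn := hyphen_newline.toList
  let offset := PySem.Chars.find t tg        -- text.index(target_string); raises the same ValueError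
  let pieces := pvLoopB hn.length replacement.toList.length offset positions [(0, 0, tg.length)] tg.length 0
  String.ofList (pvMat tg hn pieces)

-- ===== PRECONDITION & SPEC =====
-- Pre_ excludes exactly the inputs where text.index(target_string) raises ValueError
-- (target_string not a substring of text); B raises there too.
def Pre_reinsert_hyphen_newline (text : String) (positions : List Int) (target_string : String) (hyphen_newline : String) (replacement : String) : Prop :=
  PySem.Str.isIn target_string text = true
instance (text : String) (positions : List Int) (target_string : String) (hyphen_newline : String) (replacement : String) : Decidable (Pre_reinsert_hyphen_newline text positions target_string hyphen_newline replacement) := by unfold Pre_reinsert_hyphen_newline; infer_instance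

def pvWitness_reinsert_hyphen_newline : String × List Int × String × String × String :=
  ("abcdef", [3, 5], "bcde", " -\n", "")

def Spec_reinsert_hyphen_newline (text : String) (positions : List Int) (target_string : String) (hyphen_newline : String) (replacement : String) (out : String) : Prop := out = reinsert_hyphen_newline_alt text positions target_string hyphen_newline replacement
instance (text : String) (positions : List Int) (target_string : String) (hyphen_newline : String) (replacement : String) (out : String) : Decidable (Spec_reinsert_hyphen_newline text positions target_string hyphen_newline replacement out) := by unfold Spec_reinsert_hyphen_newline; infer_instance

-- ===== CLAIM (what is proved, stated in full; the proofs are below) =====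
def Claim_equal_reinsert_hyphen_newline : Prop := ∀ (text : String) (positions : List Int) (target_string : String) (hyphen_newline : String) (replacement : String), Dom_reinsert_hyphen_newline text positions target_string hyphen_newline replacement → Pre_reinsert_hyphen_newline text positions target_string hyphen_newline replacement → Spec_reinsert_hyphen_newline text positions target_string hyphen_newline replacement (reinsert_hyphen_newline text positions target_string hyphen_newline replacement)

-- ===== LEMMAS AND PROOFS =====

-- well-formedness: every piece materializes to exactly its recorded length
def pvWF (tg hn : List Char) (ps : List (Nat × Nat × Nat)) : Prop :=
  ∀ pc ∈ ps, (pvMatPiece tg hn pc).length = pc.2.2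

theorem pvWF_cons {tg hn : List Char} {pc : Nat × Nat × Nat} {rest : List (Nat × Nat × Nat)}
    (h : pvWF tg hn (pc :: rest)) : pvWF tg hn rest :=
  fun q hq => h q (List.mem_cons_of_mem _ hq)

theorem pvMat_takePieces (tg hn : List Char) (n : Nat) (ps : List (Nat × Nat × Nat))
    (h : pvWF tg hn ps) : pvMat tg hn (pvTakePieces n ps) = (pvMat tg hn ps).take n := by
  induction ps generalizing n with
  | nil => simp [pvMat, pvTakePieces]
  | cons pc rest ih =>
    obtain ⟨s, a, l⟩ := pc
    have hlen : (pvMatPiece tg hn (s, a, l)).length = l := h _ (by simp)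
    by_cases hc : n ≤ l
    · simp only [pvTakePieces, if_pos hc, pvMat, List.map_cons, List.map_nil,
        List.flatten_cons, List.flatten_nil, List.append_nil]
      rw [List.take_append_of_le_length (by omega)]
      simp only [pvMatPiece] at hlen ⊢
      rw [List.take_take, Nat.min_eq_left hc]
    · simp only [pvTakePieces, if_neg hc, pvMat, List.map_cons, List.flatten_cons]
      rw [List.take_append, hlen,
        List.take_of_length_le (by omega : (pvMatPiece tg hn (s, a, l)).length ≤ n)]
      have := ih (n - l) (pvWF_cons h)
      simp only [pvMat] at this
      rw [this]

theorem pvMat_dropPieces (tg hn : List Char) (n : Nat) (ps : List (Nat × Nat × Nat))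
    (h : pvWF tg hn ps) : pvMat tg hn (pvDropPieces n ps) = (pvMat tg hn ps).drop n := by
  induction ps generalizing n with
  | nil => simp [pvMat, pvDropPieces]
  | cons pc rest ih =>
    obtain ⟨s, a, l⟩ := pc
    have hlen : (pvMatPiece tg hn (s, a, l)).length = l := h _ (by simp)
    by_cases hc : n < l
    · simp only [pvDropPieces, if_pos hc, pvMat, List.map_cons, List.flatten_cons]
      rw [List.drop_append, hlen, (by omega : n - l = 0), List.drop_zero]
      congr 1
      simp only [pvMatPiece] at hlen ⊢
      rw [List.drop_take, List.drop_drop]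
    · simp only [pvDropPieces, if_neg hc, pvMat, List.map_cons, List.flatten_cons]
      rw [List.drop_append, hlen,
        List.drop_eq_nil_of_le (by omega : (pvMatPiece tg hn (s, a, l)).length ≤ n),
        List.nil_append]
      have := ih (n - l) (pvWF_cons h)
      simp only [pvMat] at this
      rw [this]

theorem pvWF_takePieces (tg hn : List Char) (n : Nat) (ps : List (Nat × Nat × Nat))
    (h : pvWF tg hn ps) : pvWF tg hn (pvTakePieces n ps) := by
  induction ps generalizing n with
  | nil => simpa [pvTakePieces] using h
  | cons pc rest ih =>
    obtain ⟨s, a, l⟩ := pc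
    have hlen : (pvMatPiece tg hn (s, a, l)).length = l := h _ (by simp)
    by_cases hc : n ≤ l
    · simp only [pvTakePieces, if_pos hc]
      intro q hq
      simp only [List.mem_singleton] at hq
      subst hq
      simp only [pvMatPiece] at hlen ⊢
      simp only [List.length_take, List.length_drop] at hlen ⊢
      omega
    · simp only [pvTakePieces, if_neg hc]
      intro q hq
      rcases List.mem_cons.mp hq with rfl | hq
      · exact hlen
      · exact ih (n - l) (pvWF_cons h) q hq

theorem pvWF_dropPieces (tg hn : List Char) (n : Nat) (ps : List (Nat × Nat × Nat))
    (h : pvWF tg hn ps) : pvWF tg hn (pvDropPieces n ps) := by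
  induction ps generalizing n with
  | nil => simpa [pvDropPieces] using h
  | cons pc rest ih =>
    obtain ⟨s, a, l⟩ := pc
    have hlen : (pvMatPiece tg hn (s, a, l)).length = l := h _ (by simp)
    by_cases hc : n < l
    · simp only [pvDropPieces, if_pos hc]
      intro q hq
      rcases List.mem_cons.mp hq with rfl | hq
      · simp only [pvMatPiece] at hlen ⊢
        simp only [List.length_take, List.length_drop] at hlen ⊢
        omega
      · exact pvWF_cons h q hq
    · simp only [pvDropPieces, if_neg hc]
      exact ih (n - l) (pvWF_cons h)

theorem pvLoop_eq (tg hn repl : List Char) (offset : Int) (positions : List Int)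
    (pieces : List (Nat × Nat × Nat)) (snippet : List Char) (acc : Int)
    (hwf : pvWF tg hn pieces) (hmat : pvMat tg hn pieces = snippet) :
    pvMat tg hn (pvLoopB hn.length repl.length offset positions pieces snippet.length acc) =
      pvLoopA hn repl offset positions snippet acc := by
  induction positions generalizing pieces snippet acc with
  | nil => simpa [pvLoopB, pvLoopA]
  | cons pos rest ih =>
    simp only [pvLoopB, pvLoopA]
    by_cases h0 : pos - offset - acc < 0
    · simp only [if_pos h0]
      exact ih pieces snippet _ hwf hmat
    · simp only [if_neg h0]
      by_cases h1 : pos - offset - acc < (snippet.length : Int)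
      · simp only [if_pos h1]
        set p := (pos - offset - acc).toNat with hp
        have hple : (p : Int) = pos - offset - acc := Int.toNat_of_nonneg (by omega)
        have hplt : p < snippet.length := by omega
        have hd : (pos - offset - acc + (repl.length : Int)).toNat = p + repl.length := by omega
        -- the edited snippet, on A's side
        have hsliceL : PySem.List.slice snippet none (some (pos - offset - acc)) = snippet.take p := by
          rw [PySem.List.slice_to _ (by omega)]
        have hsliceR : PySem.List.slice snippet (some (pos - offset - acc + (repl.length : Int))) none
            = snippet.drop (p + repl.length) := by
          rw [PySem.List.slice_from _ (by omega), hd]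
        rw [hsliceL, hsliceR]
        -- the edited pieces, on B's side
        set pieces' := pvTakePieces p pieces ++ [(1, 0, hn.length)] ++ pvDropPieces (p + repl.length) pieces with hpieces'
        set snippet' := snippet.take p ++ hn ++ snippet.drop (p + repl.length) with hsnip'
        have hwf' : pvWF tg hn pieces' := by
          intro q hq
          simp only [hpieces', List.mem_append, List.mem_singleton] at hq
          rcases hq with (hq | rfl) | hq
          · exact pvWF_takePieces tg hn p pieces hwf q hq
          · simp [pvMatPiece]
          · exact pvWF_dropPieces tg hn (p + repl.length) pieces hwf q hq
        have hmat' : pvMat tg hn pieces' = snippet' := by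
          simp only [hpieces', pvMat, List.map_append, List.flatten_append, hsnip']
          rw [← pvMat, ← pvMat, ← pvMat, pvMat_takePieces tg hn p pieces hwf,
            pvMat_dropPieces tg hn (p + repl.length) pieces hwf, hmat]
          simp [pvMat, pvMatPiece]
        have hlen' : p + hn.length + (snippet.length - (p + repl.length)) = snippet'.length := by
          simp only [hsnip', List.length_append, List.length_take, List.length_drop]
          omega
        rw [hlen']
        exact ih pieces' snippet' acc hwf' hmat'
      · simp only [if_neg h1, hmat]

-- ===== VERDICT =====
theorem reinsert_hyphen_newline_spec : Claim_equal_reinsert_hyphen_newline := by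
  intro text positions target_string hyphen_newline replacement _hdom hpre
  unfold Spec_reinsert_hyphen_newline reinsert_hyphen_newline reinsert_hyphen_newline_alt
  simp only []
  set t := text.toList
  set tg := target_string.toList
  set hn := hyphen_newline.toList
  set f := PySem.Chars.find t tg with hf
  have hinf : tg <:+: t := (PySem.Str.isIn_iff_infix target_string text).mp hpre
  have hfpos : 0 ≤ f := (PySem.Chars.find_nonneg_iff t tg).mpr hinf
  have hspec := PySem.Chars.find_spec (s := t) (sub := tg) hfpos
  obtain ⟨u, hu⟩ := hspec.1
  -- A's snippet is exactly the target buffer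
  have hsnip : PySem.List.slice t (some f) (some (f + (tg.length : Int))) = tg := by
    rw [PySem.List.slice_toNat t hfpos (by positivity)]
    have : (f + (tg.length : Int)).toNat - f.toNat = tg.length := by omega
    rw [this, ← hu]
    exact List.take_left' rfl
  -- B's initial piece table materializes to the target buffer
  have hmat0 : pvMat tg hn [(0, 0, tg.length)] = tg := by
    simp [pvMat, pvMatPiece]
  have hwf0 : pvWF tg hn [(0, 0, tg.length)] := by
    intro q hq
    simp only [List.mem_singleton] at hq
    subst hq
    simp [pvMatPiece]
  have := pvLoop_eq tg hn replacement.toList f positions [(0, 0, tg.length)] tg 0 hwf0 hmat0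
  rw [hsnip, this]
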